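-- pv_equiv track=rewrite | github.com/ranjantushar19/CodingPractice | Dynamic Programming/CoinChangePermutation.py | coinChangePermutation
-- ===== SOURCE A (Python) =====
-- def coinChangePermutation(arr, target):
--     n = len(arr)
--     res = [0] * (target + 1)
--     res[0] = 1
--
--     for j in range(1, target + 1):
--         for i in arr:
--             if j - i >= 0:
--                 res[j] += res[j-i]
--     return res[target]
-- ===== SOURCE B (Python) =====
-- def coinChangePermutation(arr, target):
--     cache = {}
--
--     def count(t):
--         if t < 0:
--             return 0
--         if t == 0:
--             return 1
--         if t not in cache:
--             cache[t] = sum(count(t - i) for i in arr)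
--         return cache[t]
--
--     # warm the cache in increasing order so each recursive call is shallow
--     for t in range(1, target + 1):
--         count(t)
--     return count(target)
-- ===== Notes on version B (the rewrite author's own statement) =====
-- stated objective: alternative
-- what changed: Replaces A's bottom-up O(target)-table DP (nested loops over a preallocated list with in-place +=) by a top-down dict-memoized recursive count(t) (1 if t==0, 0 if t<0, else sum(count(t-i) for i in arr)), driven in increasing order of t so the recursion stays shallow; B returns 0 instead of raising on negative targets.
-- outside the precondition, e.g. on coinChangePermutation([0], 1): A returns 0, B raises RecursionError; on coinChangePermutation([1, 0], 1): A returns 2, B raises RecursionError; on coinChangePermutation([1], -1): A raises IndexError, B returns 0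
import Mathlib
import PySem

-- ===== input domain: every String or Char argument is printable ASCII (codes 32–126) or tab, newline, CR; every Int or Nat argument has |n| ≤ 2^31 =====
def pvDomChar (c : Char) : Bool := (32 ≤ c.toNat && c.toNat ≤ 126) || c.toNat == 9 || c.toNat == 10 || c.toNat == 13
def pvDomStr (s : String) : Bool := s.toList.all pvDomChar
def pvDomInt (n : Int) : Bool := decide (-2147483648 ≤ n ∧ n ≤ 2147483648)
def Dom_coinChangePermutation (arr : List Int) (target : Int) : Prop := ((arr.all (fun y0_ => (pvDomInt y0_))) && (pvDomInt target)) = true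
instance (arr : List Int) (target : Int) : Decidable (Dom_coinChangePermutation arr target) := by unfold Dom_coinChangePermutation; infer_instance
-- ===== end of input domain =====

-- B replaces A's bottom-up table DP by a dict-memoized recursive count with an iterative
-- warming driver (objective: alternative decomposition); equal on Pre_, B returns 0 where A
-- raises IndexError on negative targets.

-- ===== PORT A =====
def coinChangePermutation (arr : List Int) (target : Int) : Int :=
  let _n := arr.length
  let res0 : List Int := List.replicate (target + 1).toNat 0
  let res1 := PySem.List.pySetD res0 0 1      -- res[0] = 1 (in range under Pre_)
  let res := (PySem.List.pyRange 1 (target + 1) 1).foldl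
    (fun r j => arr.foldl
      (fun r i =>
        if j - i ≥ 0 then
          PySem.List.pySetD r j (PySem.List.pyGetD r j 0 + PySem.List.pyGetD r (j - i) 0)
        else r)
      r)
    res1
  PySem.List.pyGetD res target 0

-- ===== PORT B =====
-- count(t) with its cache threaded; fuel only makes the recursion total (ample under Pre_)
def pvCount (arr : List Int) : Nat → Int → PySem.Dict Int Int → Int × PySem.Dict Int Int
  | 0, _, c => (0, c)
  | fuel + 1, t, c =>
    if t < 0 then (0, c)
    else if t = 0 then (1, c)
    else
      match c.get? t with
      | some v => (v, c)
      | none =>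
        let p := arr.foldl
          (fun (p : Int × PySem.Dict Int Int) i =>
            let q := pvCount arr fuel (t - i) p.2
            (p.1 + q.1, q.2))
          (0, c)
        (p.1, p.2.insert t p.1)

def coinChangePermutation_alt (arr : List Int) (target : Int) : Int :=
  let fuel := target.toNat + 1
  let cache := (PySem.List.pyRange 1 (target + 1) 1).foldl
    (fun c t => (pvCount arr fuel t c).2) PySem.Dict.empty
  (pvCount arr fuel target cache).1

-- ===== PRECONDITION & SPEC =====
-- Pre_ excludes negative targets (A's res[0]=1 on the empty table raises IndexError, B returns 0),
-- lists with a coin ≤ 0 when target ≥ 1 (a negative coin makes A raise IndexError; on a coin 0 A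
-- returns an order-dependent accumulator artefact while B's recursion does not terminate).
def Pre_coinChangePermutation (arr : List Int) (target : Int) : Prop :=
  0 ≤ target ∧ (target = 0 ∨ ∀ i ∈ arr, 1 ≤ i)
instance (arr : List Int) (target : Int) : Decidable (Pre_coinChangePermutation arr target) := by
  unfold Pre_coinChangePermutation; infer_instance

def pvWitness_coinChangePermutation : List Int × Int := ([1, 2], 4)

def Spec_coinChangePermutation (arr : List Int) (target : Int) (out : Int) : Prop :=
  out = coinChangePermutation_alt arr target
instance (arr : List Int) (target : Int) (out : Int) : Decidable (Spec_coinChangePermutation arr target out) := by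
  unfold Spec_coinChangePermutation; infer_instance

-- ===== CLAIM (what is proved, stated in full; the proofs are below) =====
def Claim_equal_coinChangePermutation : Prop := ∀ (arr : List Int) (target : Int), Dom_coinChangePermutation arr target → Pre_coinChangePermutation arr target → Spec_coinChangePermutation arr target (coinChangePermutation arr target)

-- ===== LEMMAS AND PROOFS =====

def pvTable (arr : List Int) : Nat → List Int
  | 0 => [1]
  | n + 1 =>
    let prev := pvTable arr n
    prev ++ [arr.foldl
      (fun s i => s + if 1 ≤ i ∧ i ≤ ((n : Int) + 1) then prev.getD (n + 1 - i.toNat) 0 else 0) 0]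

def pvCnt (arr : List Int) (k : Nat) : Int := (pvTable arr k).getD k 0

theorem pvTable_length (arr : List Int) (n : Nat) : (pvTable arr n).length = n + 1 := by
  induction n with
  | zero => rfl
  | succ n ih => simp [pvTable, ih]

theorem pvTable_getD (arr : List Int) {k n : Nat} (h : k ≤ n) :
    (pvTable arr n).getD k 0 = pvCnt arr k := by
  induction n with
  | zero => have : k = 0 := by omega
            subst this; rfl
  | succ n ih =>
    rcases Nat.lt_or_ge k (n + 1) with hk | hk
    · rw [pvTable]
      rw [List.getD_append _ _ _ _ (h := by rw [pvTable_length]; omega)]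
      exact ih (by omega)
    · have : k = n + 1 := by omega
      subst this; rfl

theorem pvCnt_succ (arr : List Int) (n : Nat) :
    pvCnt arr (n + 1) =
      arr.foldl (fun s i => s + if 1 ≤ i ∧ i ≤ ((n : Int) + 1) then pvCnt arr (n + 1 - i.toNat) else 0) 0 := by
  have hlen := pvTable_length arr n
  show (pvTable arr (n+1)).getD (n+1) 0 = _
  rw [pvTable]
  rw [List.getD_append_right _ _ _ _ (h := by rw [pvTable_length])]
  simp only [pvTable_length]
  have : n + 1 - (n + 1) = 0 := by omega
  rw [this]
  simp only [List.getD_cons_zero]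
  congr 1
  funext s i
  split_ifs with h
  · rw [pvTable_getD arr (by omega : n + 1 - i.toNat ≤ n)]
  · rfl

theorem pvA_inner (arr : List Int) (target : Int) (l : List Int)
    (hl : ∀ i ∈ l, 1 ≤ i) :
    ∀ (r : List Int) (j s : Int),
      r.length = (target + 1).toNat → 1 ≤ j → j ≤ target →
      (∀ k : Int, 0 ≤ k → k < j → PySem.List.pyGetD r k 0 = pvCnt arr k.toNat) →
      PySem.List.pyGetD r j 0 = s →
      ((l.foldl (fun r i => if j - i ≥ 0 then PySem.List.pySetD r j (PySem.List.pyGetD r j 0 + PySem.List.pyGetD r (j - i) 0) else r) r).length = (target + 1).toNat ∧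
       (∀ k : Int, 0 ≤ k → k ≠ j → PySem.List.pyGetD (l.foldl (fun r i => if j - i ≥ 0 then PySem.List.pySetD r j (PySem.List.pyGetD r j 0 + PySem.List.pyGetD r (j - i) 0) else r) r) k 0 = PySem.List.pyGetD r k 0) ∧
       PySem.List.pyGetD (l.foldl (fun r i => if j - i ≥ 0 then PySem.List.pySetD r j (PySem.List.pyGetD r j 0 + PySem.List.pyGetD r (j - i) 0) else r) r) j 0 =
         l.foldl (fun s i => s + if 1 ≤ i ∧ i ≤ j then pvCnt arr ((j - i).toNat) else 0) s) := by
  induction l with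
  | nil => intro r j s hlen hj1 hj2 _ hj; exact ⟨hlen, fun _ _ _ => rfl, hj⟩
  | cons i l ih =>
    intro r j s hlen hj1 hj2 hlow hj
    obtain ⟨hi1, hl'⟩ := List.forall_mem_cons.mp hl
    by_cases hij : i ≤ j
    · have hguard : j - i ≥ 0 := by omega
      have hjn : j = ((j.toNat : Nat) : Int) := (Int.toNat_of_nonneg (by omega)).symm
      have hjlt : j.toNat < r.length := by rw [hlen]; omega
      have hset : ∀ (v : Int) (k : Int), 0 ≤ k →
          PySem.List.pyGetD (PySem.List.pySetD r j v) k 0 = if k = j then v else PySem.List.pyGetD r k 0 := by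
        intro v k hk
        have hkn : k = ((k.toNat : Nat) : Int) := (Int.toNat_of_nonneg hk).symm
        rw [hjn, hkn, PySem.List.pyGetD_pySetD_natCast _ _ _ _ _ hjlt]
        simp only [Nat.cast_inj]
      have hval : PySem.List.pyGetD r j 0 + PySem.List.pyGetD r (j - i) 0
          = s + pvCnt arr ((j - i).toNat) := by
        rw [hj, hlow (j - i) (by omega) (by omega)]
      simp only [List.foldl_cons, if_pos hguard, hval]
      set v := s + pvCnt arr ((j - i).toNat) with hv
      have hres := ih hl' (PySem.List.pySetD r j v) j v
        (by rw [PySem.List.length_pySetD, hlen])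
        hj1 hj2
        (fun k hk0 hkj => by rw [hset _ _ hk0, if_neg (by omega)]; exact hlow k hk0 hkj)
        (by rw [hset _ _ (by omega), if_pos rfl])
      refine ⟨hres.1, fun k hk0 hk => ?_, ?_⟩
      · rw [hres.2.1 k hk0 hk, hset _ _ hk0, if_neg hk]
      · rw [hres.2.2, if_pos ⟨hi1, hij⟩]
    · have hguard : ¬ (j - i ≥ 0) := by omega
      simp only [List.foldl_cons, if_neg hguard]
      have hres := ih hl' r j s hlen hj1 hj2 hlow hj
      refine ⟨hres.1, hres.2.1, ?_⟩
      rw [hres.2.2, if_neg (by omega), add_zero]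

theorem pvA_outer (arr : List Int) (target : Int) (ht : 1 ≤ target) (hall : ∀ i ∈ arr, 1 ≤ i)
    (m : Nat) (hm : (m : Int) ≤ target) :
    ((PySem.List.pyRange 1 ((m : Int) + 1) 1).foldl
        (fun r j => arr.foldl (fun r i => if j - i ≥ 0 then PySem.List.pySetD r j (PySem.List.pyGetD r j 0 + PySem.List.pyGetD r (j - i) 0) else r) r)
        (PySem.List.pySetD (List.replicate (target + 1).toNat (0 : Int)) 0 1)).length = (target + 1).toNat ∧
    (∀ k : Int, 0 ≤ k → k ≤ (m : Int) →
      PySem.List.pyGetD ((PySem.List.pyRange 1 ((m : Int) + 1) 1).foldl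
        (fun r j => arr.foldl (fun r i => if j - i ≥ 0 then PySem.List.pySetD r j (PySem.List.pyGetD r j 0 + PySem.List.pyGetD r (j - i) 0) else r) r)
        (PySem.List.pySetD (List.replicate (target + 1).toNat (0 : Int)) 0 1)) k 0 = pvCnt arr k.toNat) ∧
    (∀ k : Int, (m : Int) < k →
      PySem.List.pyGetD ((PySem.List.pyRange 1 ((m : Int) + 1) 1).foldl
        (fun r j => arr.foldl (fun r i => if j - i ≥ 0 then PySem.List.pySetD r j (PySem.List.pyGetD r j 0 + PySem.List.pyGetD r (j - i) 0) else r) r)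
        (PySem.List.pySetD (List.replicate (target + 1).toNat (0 : Int)) 0 1)) k 0 = 0) := by
  have hT : 1 ≤ (target + 1).toNat := by omega
  induction m with
  | zero =>
    rw [show ((0 : Nat) : Int) + 1 = 1 by norm_num, PySem.List.pyRange_one_eq_nil le_rfl]
    simp only [List.foldl_nil]
    have hget : ∀ k : Int, 0 ≤ k →
        PySem.List.pyGetD (PySem.List.pySetD (List.replicate (target + 1).toNat (0 : Int)) 0 1) k 0
          = if k = 0 then 1 else 0 := by
      intro k hk
      have hkn : k = ((k.toNat : Nat) : Int) := (Int.toNat_of_nonneg hk).symm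
      rw [show (0 : Int) = ((0 : Nat) : Int) by norm_num, hkn,
        PySem.List.pyGetD_pySetD_natCast _ _ _ _ _ (by simpa using by omega)]
      simp only [Nat.cast_inj, PySem.List.pyGetD_natCast]
      split_ifs with h
      · rfl
      · simp only [List.getD_eq_getElem?_getD, List.getElem?_replicate]
        split <;> rfl
    refine ⟨by simp [PySem.List.length_pySetD], fun k hk0 hk1 => ?_, fun k hk => ?_⟩
    · have : k = 0 := by omega
      subst this
      have := hget 0 le_rfl
      rw [if_pos rfl] at this
      rw [this]; rfl
    · rw [hget k (by omega), if_neg (by omega)]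
  | succ m ih =>
    have hm' : (m : Int) ≤ target := by push_cast at hm ⊢; omega
    obtain ⟨ihlen, ihlow, ihhigh⟩ := ih hm'
    have hsplit : PySem.List.pyRange 1 (((m + 1 : Nat) : Int) + 1) 1
        = PySem.List.pyRange 1 ((m : Int) + 1) 1 ++ [(m : Int) + 1] := by
      push_cast
      exact PySem.List.pyRange_one_succ_right (by omega)
    rw [hsplit, List.foldl_append, List.foldl_cons, List.foldl_nil]
    have hres := pvA_inner arr target arr hall _ ((m : Int) + 1) 0 ihlen (by omega) (by push_cast at hm; omega)
      (fun k hk0 hkj => ihlow k hk0 (by omega))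
      (ihhigh _ (by omega))
    refine ⟨hres.1, fun k hk0 hk1 => ?_, fun k hk => ?_⟩
    · by_cases hkm : k ≤ (m : Int)
      · rw [hres.2.1 k hk0 (by omega), ihlow k hk0 hkm]
      · have hk : k = (m : Int) + 1 := by push_cast at hk1; omega
        subst hk
        rw [hres.2.2]
        have hkn : ((m : Int) + 1).toNat = m + 1 := by omega
        rw [hkn, pvCnt_succ]
        congr 1
        funext s i
        split_ifs with h
        · have he : ((m : Int) + 1 - i).toNat = m + 1 - i.toNat := by omega
          rw [he]
        · rfl
    · have hk' : (m : Int) < k := by push_cast at hk; omega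
      rw [hres.2.1 k (by omega) (by omega)]
      exact ihhigh k hk'

theorem pvSum_eq (arr : List Int) (t : Int) (ht : 1 ≤ t) :
    arr.foldl (fun s i => s + if 1 ≤ i ∧ i ≤ t then pvCnt arr ((t - i).toNat) else 0) 0
      = pvCnt arr t.toNat := by
  obtain ⟨n, hn⟩ : ∃ n : Nat, t = (n : Int) + 1 := ⟨t.toNat - 1, by omega⟩
  subst hn
  have htn : ((n : Int) + 1).toNat = n + 1 := by omega
  rw [htn, pvCnt_succ]
  congr 1
  funext s i
  split_ifs with h
  · have he : ((n : Int) + 1 - i).toNat = n + 1 - i.toNat := by omega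
    rw [he]
  · rfl

theorem pvCount_succ (arr : List Int) (f : Nat) (t : Int) (c : PySem.Dict Int Int) :
    pvCount arr (f + 1) t c =
      if t < 0 then (0, c)
      else if t = 0 then (1, c)
      else
        match c.get? t with
        | some v => (v, c)
        | none =>
          let p := arr.foldl
            (fun (p : Int × PySem.Dict Int Int) i =>
              let q := pvCount arr f (t - i) p.2
              (p.1 + q.1, q.2))
            (0, c)
          (p.1, p.2.insert t p.1) := rfl

theorem pvB_step (arr : List Int) (hall : ∀ i ∈ arr, 1 ≤ i) (f : Nat) (t : Int)
    (c : PySem.Dict Int Int) (ht : 1 ≤ t)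
    (hc : ∀ k : Int, 1 ≤ k → k < t → c.get? k = some (pvCnt arr k.toNat))
    (hnone : c.get? t = none) :
    pvCount arr (f + 2) t c = (pvCnt arr t.toNat, c.insert t (pvCnt arr t.toNat)) := by
  have hinner : ∀ (l : List Int), (∀ i ∈ l, 1 ≤ i) → ∀ s : Int,
      l.foldl (fun (p : Int × PySem.Dict Int Int) i =>
          let q := pvCount arr (f + 1) (t - i) p.2
          (p.1 + q.1, q.2)) (s, c)
        = (l.foldl (fun s i => s + if 1 ≤ i ∧ i ≤ t then pvCnt arr ((t - i).toNat) else 0) s, c) := by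
    intro l hl
    induction l with
    | nil => intro s; rfl
    | cons i l ihl =>
      intro s
      obtain ⟨hi1, hl'⟩ := List.forall_mem_cons.mp hl
      have hq : pvCount arr (f + 1) (t - i) c
          = ((if 1 ≤ i ∧ i ≤ t then pvCnt arr ((t - i).toNat) else 0), c) := by
        rw [pvCount_succ]
        rcases lt_trichotomy (t - i) 0 with hti | hti | hti
        · rw [if_pos hti, if_neg (by omega : ¬ (1 ≤ i ∧ i ≤ t))]
        · rw [if_neg (by omega), if_pos hti, if_pos (⟨hi1, by omega⟩ : 1 ≤ i ∧ i ≤ t),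
            show (t - i).toNat = 0 by omega]
          rfl
        · rw [if_neg (by omega), if_neg (by omega), hc (t - i) (by omega) (by omega),
            if_pos (⟨hi1, by omega⟩ : 1 ≤ i ∧ i ≤ t)]
      simp only [List.foldl_cons, hq]
      exact ihl hl' _
  rw [show f + 2 = f + 1 + 1 by omega, pvCount_succ]
  rw [if_neg (by omega), if_neg (by omega), hnone]
  rw [hinner arr hall 0, pvSum_eq arr t ht]

theorem pvB_warm (arr : List Int) (target : Int) (ht : 1 ≤ target) (hall : ∀ i ∈ arr, 1 ≤ i)
    (m : Nat) (hm : (m : Int) ≤ target) :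
    ∀ k : Int,
      ((PySem.List.pyRange 1 ((m : Int) + 1) 1).foldl
          (fun c t => (pvCount arr (target.toNat + 1) t c).2) PySem.Dict.empty).get? k
        = if 1 ≤ k ∧ k ≤ (m : Int) then some (pvCnt arr k.toNat) else none := by
  induction m with
  | zero =>
    intro k
    rw [show ((0 : Nat) : Int) + 1 = 1 by norm_num, PySem.List.pyRange_one_eq_nil le_rfl]
    simp only [List.foldl_nil, PySem.Dict.get?_empty]
    rw [if_neg (by push_cast; omega)]
  | succ m ih =>
    intro k
    have hm' : (m : Int) ≤ target := by push_cast at hm ⊢; omega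
    have hsplit : PySem.List.pyRange 1 (((m + 1 : Nat) : Int) + 1) 1
        = PySem.List.pyRange 1 ((m : Int) + 1) 1 ++ [(m : Int) + 1] := by
      push_cast
      exact PySem.List.pyRange_one_succ_right (by omega)
    rw [hsplit, List.foldl_append, List.foldl_cons, List.foldl_nil]
    have hf : target.toNat + 1 = (target.toNat - 1) + 2 := by omega
    have ih' := ih hm'
    rw [hf] at ih' ⊢
    rw [pvB_step arr hall _ _ _ (by omega)
      (fun k hk1 hk2 => by rw [ih' k, if_pos (⟨hk1, by omega⟩ : 1 ≤ k ∧ k ≤ (m : Int))])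
      (by rw [ih' ((m : Int) + 1), if_neg (by omega)])]
    rw [PySem.Dict.get?_insert]
    split_ifs with h1 h2 h2
    · rw [h1]
    · exfalso; push_cast at h2; omega
    · rw [ih' k, if_pos (⟨h2.1, by have h22 := h2.2; push_cast at h22; omega⟩ : 1 ≤ k ∧ k ≤ (m : Int))]
    · rw [ih' k, if_neg (by push_cast at h2; omega)]

-- ===== VERDICT (by name: the statement is the Claim_ definition above) =====
theorem coinChangePermutation_spec : Claim_equal_coinChangePermutation := by
  intro arr target _ hpre
  unfold Spec_coinChangePermutation
  obtain ⟨ht0, hrest⟩ := hpre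
  by_cases h0 : target = 0
  · subst h0
    simp only [coinChangePermutation, coinChangePermutation_alt,
      PySem.List.pyRange_one_eq_nil (by norm_num : (0 : Int) + 1 ≤ 1), List.foldl_nil,
      pvCount_succ]
    norm_num
    decide
  · have ht : 1 ≤ target := by omega
    have hall : ∀ i ∈ arr, 1 ≤ i := hrest.resolve_left h0
    have hmeq : ((target.toNat : Nat) : Int) = target := Int.toNat_of_nonneg ht0
    obtain ⟨alen, alow, ahigh⟩ := pvA_outer arr target ht hall target.toNat (le_of_eq hmeq)
    rw [hmeq] at alow
    have hw := pvB_warm arr target ht hall target.toNat (le_of_eq hmeq)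
    rw [hmeq] at hw
    have hbhit := hw target
    rw [if_pos (⟨ht, le_refl target⟩ : 1 ≤ target ∧ target ≤ target)] at hbhit
    simp only [coinChangePermutation, coinChangePermutation_alt]
    rw [alow target ht0 (le_refl target)]
    rw [pvCount_succ, if_neg (by omega), if_neg h0, hbhit]
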